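-- pv_equiv track=rewrite | github.com/wxmann/transition-matrix | calc/create.py | _future_states_helper
-- ===== SOURCE A (Python) =====
-- def _future_states_helper(all_states, current_state):
--     future_states_in_order = []
--     i_0 = all_states.index(current_state)
--     num_states = len(all_states)
--     for j in range(1, num_states):
--         i_pj = i_0 + j
--         i_nj = i_0 - j
--         if i_pj < num_states:
--             future_states_in_order.append(all_states[i_pj])
--         if i_nj >= 0:
--             future_states_in_order.append(all_states[i_nj])
--     return future_states_in_order
-- ===== SOURCE B (Python) =====
-- def _future_states_helper(all_states, current_state):
--     i_0 = all_states.index(current_state)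
--     a = all_states[i_0 + 1:]
--     b = all_states[:i_0][::-1]
--     out = []
--     while a or b:
--         if a:
--             out.append(a[0])
--         a, b = b, a[1:]
--     return out
-- ===== Notes on version B (the rewrite author's own statement) =====
-- stated objective: simpler
-- what changed: Replaces A's per-round index arithmetic with bounds checks inside a range loop by slicing the list into the right part and the reversed left part and merging them by alternation (pop head, swap).
import Mathlib
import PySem

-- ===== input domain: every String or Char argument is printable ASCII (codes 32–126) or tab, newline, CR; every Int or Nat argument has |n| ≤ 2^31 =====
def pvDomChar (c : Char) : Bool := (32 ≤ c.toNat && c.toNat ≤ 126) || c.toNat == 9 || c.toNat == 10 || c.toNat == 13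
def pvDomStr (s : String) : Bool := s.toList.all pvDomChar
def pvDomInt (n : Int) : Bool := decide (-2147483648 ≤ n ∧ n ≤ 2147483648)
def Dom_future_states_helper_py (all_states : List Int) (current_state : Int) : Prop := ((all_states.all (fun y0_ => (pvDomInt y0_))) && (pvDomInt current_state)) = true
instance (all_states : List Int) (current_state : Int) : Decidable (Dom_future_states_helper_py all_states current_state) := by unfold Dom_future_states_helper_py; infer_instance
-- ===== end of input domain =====

-- B replaces A's index-arithmetic loop by two slices (right of the current state, and the
-- reversed left part) merged by alternation; same return values, simpler decomposition.

-- ===== PORT A =====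
def future_states_helper_py (all_states : List Int) (current_state : Int) : List Int :=
  match PySem.List.index? all_states current_state with
  | none => []   -- Python raises ValueError here; excluded by Pre_
  | some i0 =>
    let n : Int := all_states.length
    (PySem.List.pyRange 1 n 1).foldl (fun acc j =>
      let ipj : Int := (i0 : Int) + j
      let inj : Int := (i0 : Int) - j
      let acc1 := if ipj < n then acc ++ [PySem.List.pyGetD all_states ipj 0] else acc
      if 0 ≤ inj then acc1 ++ [PySem.List.pyGetD all_states inj 0] else acc1) []

-- ===== PORT B =====
-- the 'while a or b' loop of Source B: pop the head of a (if any), then swap a and b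
def pvWhileMerge : List Int → List Int → List Int
  | [], [] => []
  | [], y :: ys => pvWhileMerge (y :: ys) []
  | x :: xs, b => x :: pvWhileMerge b xs
termination_by a b => (a.length + b.length, b.length)
decreasing_by all_goals simp; omega

def future_states_helper_py_alt (all_states : List Int) (current_state : Int) : List Int :=
  match PySem.List.index? all_states current_state with
  | none => []   -- Python raises ValueError here; excluded by Pre_
  | some i0 =>
    let a := PySem.List.slice all_states (some ((i0 : Int) + 1)) none
    let b := (PySem.List.slice? (PySem.List.slice all_states none (some (i0 : Int))) none none (-1)).getD []
    pvWhileMerge a b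

-- ===== PRECONDITION & SPEC =====
-- A (and B) raise ValueError from list.index when current_state is absent; exactly those inputs are excluded.
def Pre_future_states_helper_py (all_states : List Int) (current_state : Int) : Prop :=
  current_state ∈ all_states
instance (all_states : List Int) (current_state : Int) : Decidable (Pre_future_states_helper_py all_states current_state) := by unfold Pre_future_states_helper_py; infer_instance

def pvWitness_future_states_helper_py : List Int × Int := ([1, 2, 3, 4], 2)

def Spec_future_states_helper_py (all_states : List Int) (current_state : Int) (out : List Int) : Prop := out = future_states_helper_py_alt all_states current_state
instance (all_states : List Int) (current_state : Int) (out : List Int) : Decidable (Spec_future_states_helper_py all_states current_state out) := by unfold Spec_future_states_helper_py; infer_instance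

-- ===== CLAIM (what is proved, stated in full; the proofs are below) =====
def Claim_equal_future_states_helper_py : Prop := ∀ (all_states : List Int) (current_state : Int), Dom_future_states_helper_py all_states current_state → Pre_future_states_helper_py all_states current_state → Spec_future_states_helper_py all_states current_state (future_states_helper_py all_states current_state)

-- ===== LEMMAS AND PROOFS =====

lemma pvWhileMerge_nil : ∀ (a : List Int), pvWhileMerge a [] = a ∧ pvWhileMerge [] a = a := by
  intro a
  induction a with
  | nil => constructor <;> rw [pvWhileMerge]
  | cons x xs ih =>
    constructor
    · rw [pvWhileMerge]; rw [ih.2]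
    · rw [pvWhileMerge]; rw [pvWhileMerge]; rw [ih.2]

lemma pvWhileMerge_cons_cons (x y : Int) (xs ys : List Int) :
    pvWhileMerge (x :: xs) (y :: ys) = x :: y :: pvWhileMerge xs ys := by
  rw [pvWhileMerge, pvWhileMerge]

-- A's loop, phrased over Nat indices into the two sides R (right part) and L (reversed left part),
-- equals the alternating merge of the remaining suffixes.
lemma pvMergeFold (R L : List Int) : ∀ (m s : Nat) (acc : List Int),
    R.length ≤ s + m → L.length ≤ s + m →
    (List.range' s m).foldl (fun acc k =>
        let a1 := if k < R.length then acc ++ [R.getD k 0] else acc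
        if k < L.length then a1 ++ [L.getD k 0] else a1) acc
      = acc ++ pvWhileMerge (R.drop s) (L.drop s) := by
  intro m
  induction m with
  | zero =>
    intro s acc hR hL
    simp only [List.range'_zero, List.foldl_nil]
    rw [List.drop_eq_nil_of_le (by omega), List.drop_eq_nil_of_le (by omega)]
    simp [pvWhileMerge]
  | succ m ih =>
    intro s acc hR hL
    rw [List.range'_succ, List.foldl_cons]
    rw [ih (s + 1) _ (by omega) (by omega)]
    by_cases hr : s < R.length
    · rw [List.drop_eq_getElem_cons hr]
      by_cases hl : s < L.length
      · rw [List.drop_eq_getElem_cons hl, pvWhileMerge_cons_cons]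
        simp [hr, hl]
      · rw [List.drop_eq_nil_of_le (as := L) (by omega),
            List.drop_eq_nil_of_le (as := L) (by omega)]
        rw [(pvWhileMerge_nil _).1, (pvWhileMerge_nil _).1]
        simp [hr, hl]
    · rw [List.drop_eq_nil_of_le (as := R) (by omega),
          List.drop_eq_nil_of_le (as := R) (by omega)]
      by_cases hl : s < L.length
      · rw [List.drop_eq_getElem_cons hl]
        rw [(pvWhileMerge_nil _).2, (pvWhileMerge_nil _).2]
        simp [hr, hl]
      · rw [List.drop_eq_nil_of_le (as := L) (by omega),
            List.drop_eq_nil_of_le (as := L) (by omega)]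
        simp [hr, hl, pvWhileMerge]

-- ===== VERDICT (by name: the statement is the Claim_ definition above) =====
theorem future_states_helper_py_spec : Claim_equal_future_states_helper_py := by
  intro xs c _hdom hpre
  unfold Spec_future_states_helper_py future_states_helper_py future_states_helper_py_alt
  obtain ⟨i0, hidx⟩ := Option.isSome_iff_exists.mp
    ((PySem.List.index?_isSome_iff xs c).mpr hpre)
  rw [hidx]
  obtain ⟨hi0, _hget, _hfst⟩ := PySem.List.getElem_of_index?_eq_some hidx
  simp only [PySem.List.slice?_none_none_neg_one, PySem.List.slice_to_natCast, Option.getD_some]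
  rw [show ((i0 : Int) + 1) = ((i0 + 1 : Nat) : Int) by push_cast; ring]
  rw [PySem.List.slice_from_natCast]
  set R := xs.drop (i0 + 1) with hRdef
  set L := (xs.take i0).reverse with hLdef
  have hRlen : R.length = xs.length - (i0 + 1) := by simp [hRdef]
  have hLlen : L.length = i0 := by simp [hLdef]; omega
  rw [PySem.List.pyRange_one]
  have hcnt : (((xs.length : Int)) - 1).toNat = xs.length - 1 := by omega
  rw [hcnt, List.foldl_map]
  have hbody : ∀ (acc : List Int) (k : Nat), k ∈ List.range (xs.length - 1) →
      (let ipj : Int := (i0 : Int) + (1 + (k : Int))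
       let inj : Int := (i0 : Int) - (1 + (k : Int))
       let acc1 := if ipj < (xs.length : Int) then acc ++ [PySem.List.pyGetD xs ipj 0] else acc
       if 0 ≤ inj then acc1 ++ [PySem.List.pyGetD xs inj 0] else acc1)
      = (let a1 := if k < R.length then acc ++ [R.getD k 0] else acc
         if k < L.length then a1 ++ [L.getD k 0] else a1) := by
    intro acc k hk
    have hk' : k < xs.length - 1 := List.mem_range.mp hk
    simp only []
    have hc1 : ((i0 : Int) + (1 + (k : Int)) < (xs.length : Int)) ↔ k < R.length := by
      rw [hRlen]; omega
    have hc2 : (0 ≤ (i0 : Int) - (1 + (k : Int))) ↔ k < L.length := by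
      rw [hLlen]; omega
    rw [if_congr hc1 rfl rfl, if_congr hc2 rfl rfl]
    by_cases h1 : k < R.length
    · have hin : i0 + 1 + k < xs.length := by omega
      have hg : PySem.List.pyGetD xs ((i0 : Int) + (1 + (k : Int))) 0 = R.getD k 0 := by
        rw [PySem.List.pyGetD_eq_getElem xs 0 (by omega) (by omega)]
        rw [List.getD_eq_getElem R 0 (by omega)]
        simp only [hRdef, List.getElem_drop]
        congr 1
        all_goals omega
      rw [hg]
      by_cases h2 : k < L.length
      · have hg2 : PySem.List.pyGetD xs ((i0 : Int) - (1 + (k : Int))) 0 = L.getD k 0 := by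
          rw [PySem.List.pyGetD_eq_getElem xs 0 (by omega) (by omega)]
          rw [List.getD_eq_getElem L 0 (by omega)]
          simp only [hLdef, List.getElem_reverse, List.getElem_take,
            List.length_take]
          congr 1
          all_goals omega
        rw [hg2]
      · simp [h1, h2]
    · by_cases h2 : k < L.length
      · have hg2 : PySem.List.pyGetD xs ((i0 : Int) - (1 + (k : Int))) 0 = L.getD k 0 := by
          rw [PySem.List.pyGetD_eq_getElem xs 0 (by omega) (by omega)]
          rw [List.getD_eq_getElem L 0 (by omega)]
          simp only [hLdef, List.getElem_reverse, List.getElem_take,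
            List.length_take]
          congr 1
          all_goals omega
        rw [hg2]
        simp [h1, h2]
      · simp [h1, h2]
  refine Eq.trans (PySem.List.foldl_congr_mem _ _
    (fun acc k => if k < L.length then
        (if k < R.length then acc ++ [R.getD k 0] else acc) ++ [L.getD k 0]
      else if k < R.length then acc ++ [R.getD k 0] else acc) [] ?_) ?_
  · exact hbody
  · rw [List.range_eq_range']
    have := pvMergeFold R L (xs.length - 1) 0 [] (by omega) (by omega)
    simpa using this
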